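-- pv_equiv track=rewrite | github.com/JayantGoel001/HackerRank | .ipynb_checkpoints/Append and Delete-checkpoint.py | everysame
-- ===== SOURCE A (Python) =====
-- def everysame(st1,st2):
--     c=1
--     for i in range(len(st1)-1):
--         if(st1[i]==st1[i+1]):
--             c+=1
--     if(c!=len(st1)):
--         return False
--     c=1
--     for i in range(len(st2)-1):
--         if(st2[i]==st2[i+1]):
--             c+=1
--     if(c!=len(st2)):
--         return False
--     return True
-- ===== SOURCE B (Python) =====
-- def everysame(st1, st2):
--     return len(set(st1)) == 1 and len(set(st2)) == 1
-- ===== Notes on version B (the rewrite author's own statement) =====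
-- stated objective: idiomatic
-- what changed: Replaced the two adjacent-pair counting loops with set-based distinct-character counts: a string is all-identical iff it has exactly one distinct character (empty gives zero, matching A's False).
import Mathlib
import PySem

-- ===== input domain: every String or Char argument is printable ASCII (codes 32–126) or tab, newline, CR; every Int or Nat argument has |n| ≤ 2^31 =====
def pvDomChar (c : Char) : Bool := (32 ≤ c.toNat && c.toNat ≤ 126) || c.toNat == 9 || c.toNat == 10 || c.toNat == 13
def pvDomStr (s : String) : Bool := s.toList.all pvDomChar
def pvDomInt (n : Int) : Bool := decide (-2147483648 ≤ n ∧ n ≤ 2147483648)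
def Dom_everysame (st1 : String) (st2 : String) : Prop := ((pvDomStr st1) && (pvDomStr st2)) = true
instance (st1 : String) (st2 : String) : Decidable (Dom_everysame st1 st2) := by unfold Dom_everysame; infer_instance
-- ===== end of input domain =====

-- B replaces A's adjacent-pair counting loops with set-based distinct-character counts (idiomatic; same behaviour, incl. False on empty strings).

-- ===== PORT A =====
-- the per-string counting loop of A: c = 1; for i in range(len(st)-1): if st[i]==st[i+1]: c += 1
def everysameCount (st : String) : Int :=
  (PySem.List.pyRange 0 (PySem.Str.len st - 1) 1).foldl
    (fun c i => if PySem.Str.pyGet? st i == PySem.Str.pyGet? st (i + 1) then c + 1 else c) 1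

def everysame (st1 : String) (st2 : String) : Bool :=
  if everysameCount st1 ≠ PySem.Str.len st1 then false
  else if everysameCount st2 ≠ PySem.Str.len st2 then false
  else true

-- ===== PORT B =====
def everysame_alt (st1 : String) (st2 : String) : Bool :=
  (PySem.Set.ofList st1.toList).length == 1 && (PySem.Set.ofList st2.toList).length == 1

-- ===== PRECONDITION & SPEC =====
def Spec_everysame (st1 : String) (st2 : String) (out : Bool) : Prop := out = everysame_alt st1 st2
instance (st1 : String) (st2 : String) (out : Bool) : Decidable (Spec_everysame st1 st2 out) := by unfold Spec_everysame; infer_instance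

-- ===== CLAIM (what is proved, stated in full; the proofs are below) =====
def Claim_equal_everysame : Prop := ∀ (st1 : String) (st2 : String), Dom_everysame st1 st2 → Spec_everysame st1 st2 (everysame st1 st2)

-- ===== LEMMAS AND PROOFS =====

-- "all elements equal the head" as the common characterisation
def pvAllEq : List Char → Prop
  | [] => False
  | a :: t => ∀ x ∈ t, x = a

-- A-side characterisation
theorem pv_countA (l : List Char) :
    ((List.range (l.length - 1)).foldl
        (fun c (k : Nat) => if l[k]? == l[k+1]? then c + 1 else c) (1 : Int)
      = (l.length : Int)) ↔ pvAllEq l := by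
  rw [PySem.List.foldl_if_add_one]
  constructor
  · intro h
    match l with
    | [] => simp at h
    | a :: t =>
      simp only [List.length_cons, Nat.add_sub_cancel] at h
      have hle : (List.range t.length).countP
          (fun k => (a :: t)[k]? == (a :: t)[k+1]?) ≤ t.length := by
        simpa using List.countP_le_length (l := List.range t.length)
          (p := fun k => (a :: t)[k]? == (a :: t)[k+1]?)
      have hlen : (List.range t.length).countP
          (fun k => (a :: t)[k]? == (a :: t)[k+1]?) = t.length := by
        push_cast at h; omega
      have hall : ∀ k ∈ List.range t.length,
          ((a :: t)[k]? == (a :: t)[k+1]?) = true :=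
        List.countP_eq_length.mp (by rw [List.length_range]; exact hlen)
      have hadj : ∀ k, k < t.length → (a :: t)[k]? = (a :: t)[k+1]? := by
        intro k hk
        simpa using hall k (List.mem_range.mpr hk)
      have key : ∀ j (hj : j < (a :: t).length), (a :: t)[j] = a := by
        intro j
        induction j with
        | zero => intro _; simp
        | succ m ih =>
            intro hj
            simp only [List.length_cons] at hj
            have h1 := hadj m (by omega)
            have h2 := ih (by simp; omega)
            rw [List.getElem?_eq_getElem (by simp; omega),
                List.getElem?_eq_getElem (by simp; omega)] at h1
            simp only [Option.some_inj] at h1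
            exact h1.symm.trans h2
      intro x hx
      obtain ⟨i, hi, rfl⟩ := List.mem_iff_getElem.mp hx
      have := key (i + 1) (by simp; omega)
      simpa using this
  · intro h
    match l with
    | [] => exact absurd h (by simp [pvAllEq])
    | a :: t =>
      simp only [List.length_cons, Nat.add_sub_cancel]
      have hall : ∀ k ∈ List.range t.length,
          ((a :: t)[k]? == (a :: t)[k+1]?) = true := by
        intro k hk
        simp only [List.mem_range] at hk
        have h2 : (a :: t)[k+1]? = some t[k] := by
          rw [List.getElem?_cons_succ, List.getElem?_eq_getElem hk]
        have h1 : (a :: t)[k]? = some a := by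
          cases k with
          | zero => simp
          | succ m =>
              have hm : m < t.length := by omega
              rw [List.getElem?_cons_succ, List.getElem?_eq_getElem hm,
                  h t[m] (List.getElem_mem _)]
        rw [h1, h2, h t[k] (List.getElem_mem _)]
        simp
      rw [List.countP_eq_length.mpr (by simpa using hall)]
      simp [List.length_range]
      ring

-- B-side characterisation
theorem pv_setB (l : List Char) : (PySem.Set.ofList l).length = 1 ↔ pvAllEq l := by
  constructor
  · intro hlen
    obtain ⟨b, hb⟩ := List.length_eq_one_iff.mp hlen
    match l with
    | [] => simp [PySem.Set.ofList] at hlen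
    | a :: t =>
      intro x hx
      have hxa : x ∈ PySem.Set.ofList (a :: t) := (PySem.Set.mem_ofList _ _).mpr (by simp [hx])
      have haa : a ∈ PySem.Set.ofList (a :: t) := (PySem.Set.mem_ofList _ _).mpr (by simp)
      rw [hb] at hxa haa
      simp only [List.mem_singleton] at hxa haa
      exact hxa.trans haa.symm
  · intro h
    match l with
    | [] => exact absurd h (by simp [pvAllEq])
    | a :: t =>
      have hsub : ∀ x ∈ PySem.Set.ofList (a :: t), x = a := by
        intro x hx
        rcases List.mem_cons.mp ((PySem.Set.mem_ofList _ _).mp hx) with h1 | h1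
        · exact h1
        · exact h x h1
      have hmem : a ∈ PySem.Set.ofList (a :: t) := (PySem.Set.mem_ofList _ _).mpr (by simp)
      have hnd : (PySem.Set.ofList (a :: t)).Nodup := PySem.Set.nodup_ofList _
      match hS : PySem.Set.ofList (a :: t) with
      | [] => rw [hS] at hmem; simp at hmem
      | [_] => rfl
      | x :: y :: r =>
          rw [hS] at hsub hnd
          have hx := hsub x (by simp)
          have hy := hsub y (by simp)
          rw [hx, hy] at hnd
          simp at hnd

-- per-string: A's check equals B's check
theorem pv_one (st : String) :
    (decide (everysameCount st = PySem.Str.len st)) = ((PySem.Set.ofList st.toList).length == 1) := by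
  have hA : everysameCount st = (List.range (st.toList.length - 1)).foldl
      (fun c (k : Nat) => if st.toList[k]? == st.toList[k+1]? then c + 1 else c) (1 : Int) := by
    unfold everysameCount
    rw [PySem.Str.len_eq, PySem.List.pyRange_one]
    rw [List.foldl_map]
    have hn : ((st.toList.length : Int) - 1 - 0).toNat = st.toList.length - 1 := by omega
    rw [hn]
    apply PySem.List.foldl_congr_mem
    intro c k hk
    simp only [List.mem_range] at hk
    have h1 : PySem.Str.pyGet? st ((0 : Int) + (k : Int)) = st.toList[k]? := by
      rw [zero_add, PySem.Str.pyGet?_natCast]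
    have h2 : PySem.Str.pyGet? st ((0 : Int) + (k : Int) + 1) = st.toList[k+1]? := by
      have : (0 : Int) + (k : Int) + 1 = ((k + 1 : Nat) : Int) := by push_cast; ring
      rw [this, PySem.Str.pyGet?_natCast]
    rw [h1, h2]
  rw [hA, PySem.Str.len_eq]
  by_cases h : pvAllEq st.toList
  · rw [decide_eq_true ((pv_countA st.toList).mpr h)]
    exact (beq_iff_eq.mpr ((pv_setB st.toList).mpr h)).symm
  · have hb : ((PySem.Set.ofList st.toList).length == 1) = false := by
      rw [beq_eq_false_iff_ne]
      exact fun hc => h ((pv_setB st.toList).mp hc)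
    rw [hb, decide_eq_false (fun hc => h ((pv_countA st.toList).mp hc))]

-- ===== VERDICT (by name: the statement is the Claim_ definition above) =====
theorem everysame_spec : Claim_equal_everysame := by
  intro st1 st2 _
  unfold Spec_everysame everysame everysame_alt
  rw [← pv_one st1, ← pv_one st2]
  by_cases c1 : everysameCount st1 = PySem.Str.len st1 <;>
    by_cases c2 : everysameCount st2 = PySem.Str.len st2 <;>
      simp [c1, c2]
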